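-- pv_equiv track=rewrite | github.com/MrBrantCode/unitest_baseline | mut_generate/mist_train_cf/cf_78966/solution.py | compare_word_sets_frequency
-- ===== SOURCE A (Python) =====
-- def compare_word_sets_frequency(phrase1: str, phrase2: str) -> bool:
--     """
--     Determine whether the two input phrases consist of identical sets of words, with the same word frequency.
--     For example, the word 'apple' appearing twice in the first phrase should also appear twice in the second phrase.
--     """
--     dict1 = {}
--     dict2 = {}
--     for word in phrase1.split():
--         dict1[word] = dict1.get(word, 0) + 1
--     for word in phrase2.split():
--         dict2[word] = dict2.get(word, 0) + 1
--     return dict1 == dict2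
-- ===== SOURCE B (Python) =====
-- def compare_word_sets_frequency(phrase1: str, phrase2: str) -> bool:
--     """Two bags of words have identical frequencies exactly when their
--     sorted word sequences are equal."""
--     return sorted(phrase1.split()) == sorted(phrase2.split())
-- ===== Notes on version B (the rewrite author's own statement) =====
-- stated objective: simpler
-- what changed: Replaced the two hand-built frequency dictionaries and dict comparison by sorting each phrase's token list and comparing the sorted lists directly.
import Mathlib
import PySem

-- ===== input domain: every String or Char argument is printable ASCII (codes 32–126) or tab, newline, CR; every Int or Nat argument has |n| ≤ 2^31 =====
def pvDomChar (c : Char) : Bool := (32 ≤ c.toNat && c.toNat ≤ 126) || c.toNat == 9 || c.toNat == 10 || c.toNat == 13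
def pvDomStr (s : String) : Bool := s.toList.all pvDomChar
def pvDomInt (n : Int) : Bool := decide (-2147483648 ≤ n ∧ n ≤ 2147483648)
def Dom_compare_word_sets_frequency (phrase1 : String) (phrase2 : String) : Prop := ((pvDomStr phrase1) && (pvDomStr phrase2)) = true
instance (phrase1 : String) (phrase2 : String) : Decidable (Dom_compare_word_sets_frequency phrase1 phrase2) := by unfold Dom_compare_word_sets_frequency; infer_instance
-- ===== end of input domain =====

-- B replaces A's two frequency dictionaries by sorting each token list and comparing; same return value, proved equivalent.

-- ===== PORT A =====
-- Python's 'dict1 == dict2' ignores insertion order: equal sizes and every item of d1 found in d2 (exact for dicts with unique keys).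
def pyDictEq (d1 d2 : PySem.Dict String Int) : Bool :=
  d1.size == d2.size && d1.items.all (fun p => d2.get? p.1 == some p.2)

def compare_word_sets_frequency (phrase1 : String) (phrase2 : String) : Bool :=
  let dict1 := (PySem.Str.split₀ phrase1).foldl (fun d word => d.insert word (d.getD word 0 + 1)) PySem.Dict.empty
  let dict2 := (PySem.Str.split₀ phrase2).foldl (fun d word => d.insert word (d.getD word 0 + 1)) PySem.Dict.empty
  pyDictEq dict1 dict2

-- ===== PORT B =====
def compare_word_sets_frequency_alt (phrase1 : String) (phrase2 : String) : Bool :=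
  PySem.List.sorted (PySem.Str.split₀ phrase1) (fun x => x) false
    == PySem.List.sorted (PySem.Str.split₀ phrase2) (fun x => x) false

-- ===== PRECONDITION & SPEC =====
def Spec_compare_word_sets_frequency (phrase1 : String) (phrase2 : String) (out : Bool) : Prop := out = compare_word_sets_frequency_alt phrase1 phrase2
instance (phrase1 : String) (phrase2 : String) (out : Bool) : Decidable (Spec_compare_word_sets_frequency phrase1 phrase2 out) := by unfold Spec_compare_word_sets_frequency; infer_instance

-- ===== CLAIM (what is proved, stated in full; the proofs are below) =====
def Claim_equal_compare_word_sets_frequency : Prop := ∀ (phrase1 : String) (phrase2 : String), Dom_compare_word_sets_frequency phrase1 phrase2 → Spec_compare_word_sets_frequency phrase1 phrase2 (compare_word_sets_frequency phrase1 phrase2)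

-- ===== LEMMAS AND PROOFS =====

-- Python dict equality of two counters holds exactly when the counted lists are permutations.
lemma pyDictEq_counter_iff (xs ys : List String) :
    pyDictEq (PySem.Dict.counter xs) (PySem.Dict.counter ys) = true ↔ xs.Perm ys := by
  unfold pyDictEq
  simp only [Bool.and_eq_true, beq_iff_eq, List.all_eq_true]
  constructor
  · rintro ⟨hsize, hitems⟩
    -- every key of counter xs is a key of counter ys
    have hsub : PySem.Set.ofList xs ⊆ PySem.Set.ofList ys := by
      intro k hk
      have hmem : (k, (xs.count k : Int)) ∈ (PySem.Dict.counter xs).items := by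
        rw [PySem.Dict.items_counter]
        exact List.mem_map.mpr ⟨k, hk, rfl⟩
      have := hitems _ hmem
      have hc : (PySem.Dict.counter ys).contains k = true := by
        have : ((PySem.Dict.counter ys).get? k).isSome = true := by
          simp [this]
        rwa [← PySem.Dict.contains_eq_isSome_get?] at this
      rw [PySem.Dict.contains_iff_mem_keys, PySem.Dict.keys_counter] at hc
      exact hc
    have hlen : (PySem.Set.ofList ys).length ≤ (PySem.Set.ofList xs).length := by
      have h1 : (PySem.Dict.counter xs).size = (PySem.Set.ofList xs).length := by
        simp [PySem.Dict.size, PySem.Dict.items_counter]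
      have h2 : (PySem.Dict.counter ys).size = (PySem.Set.ofList ys).length := by
        simp [PySem.Dict.size, PySem.Dict.items_counter]
      omega
    have hperm : (PySem.Set.ofList xs).Perm (PySem.Set.ofList ys) :=
      (List.subperm_of_subset (PySem.Set.nodup_ofList xs) hsub).perm_of_length_le hlen
    rw [List.perm_iff_count]
    intro v
    by_cases hv : v ∈ xs
    · have hmem : (v, (xs.count v : Int)) ∈ (PySem.Dict.counter xs).items := by
        rw [PySem.Dict.items_counter]
        exact List.mem_map.mpr ⟨v, (PySem.Set.mem_ofList _ _).mpr hv, rfl⟩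
      have hget := hitems _ hmem
      have := PySem.Dict.getD_counter ys v
      rw [PySem.Dict.getD_eq_get?_getD, hget] at this
      simpa using this
    · have hv' : v ∉ ys := by
        intro hvy
        exact hv ((PySem.Set.mem_ofList _ _).mp
          (hperm.mem_iff.mpr ((PySem.Set.mem_ofList _ _).mpr hvy)))
      rw [List.count_eq_zero_of_not_mem hv, List.count_eq_zero_of_not_mem hv']
  · intro hperm
    have hcnt : ∀ v, xs.count v = ys.count v := List.perm_iff_count.mp hperm
    have hsets : (PySem.Set.ofList xs).Perm (PySem.Set.ofList ys) :=
      (List.perm_ext_iff_of_nodup (PySem.Set.nodup_ofList xs) (PySem.Set.nodup_ofList ys)).mpr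
        (fun a => by
          rw [PySem.Set.mem_ofList, PySem.Set.mem_ofList]
          exact ⟨fun h => hperm.mem_iff.mp h, fun h => hperm.mem_iff.mpr h⟩)
    refine ⟨?_, ?_⟩
    · simp [PySem.Dict.size, PySem.Dict.items_counter, hsets.length_eq]
    · intro p hp
      rw [PySem.Dict.items_counter] at hp
      obtain ⟨k, hk, rfl⟩ := List.mem_map.mp hp
      have hky : (k, (ys.count k : Int)) ∈ (PySem.Dict.counter ys).items := by
        rw [PySem.Dict.items_counter]
        exact List.mem_map.mpr ⟨k, hsets.mem_iff.mp hk, rfl⟩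
      have := PySem.Dict.get?_of_mem_items _ hky (PySem.Dict.nodup_keys_counter ys)
      rw [this, hcnt k]

-- ===== VERDICT (by name: the statement is the Claim_ definition above) =====
theorem compare_word_sets_frequency_spec : Claim_equal_compare_word_sets_frequency := by
  intro phrase1 phrase2 _
  unfold Spec_compare_word_sets_frequency compare_word_sets_frequency compare_word_sets_frequency_alt
  rw [PySem.Dict.foldl_insert_getD_add_one_eq_counter,
      PySem.Dict.foldl_insert_getD_add_one_eq_counter]
  have hA := pyDictEq_counter_iff (PySem.Str.split₀ phrase1) (PySem.Str.split₀ phrase2)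
  have hB : (PySem.List.sorted (PySem.Str.split₀ phrase1) (fun x => x) false
      == PySem.List.sorted (PySem.Str.split₀ phrase2) (fun x => x) false) = true
      ↔ (PySem.Str.split₀ phrase1).Perm (PySem.Str.split₀ phrase2) := by
    rw [beq_iff_eq, PySem.List.sorted_id_eq_sorted_id_iff_perm]
  rw [Bool.eq_iff_iff, hA, hB]
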